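-- pv_equiv track=rewrite | github.com/prachijain07/Prachi-programs | src/Problem_python/Problem_46.py | doublePreceding
-- ===== SOURCE A (Python) =====
-- def doublePreceding (values):
--     if len(values) > 0:
--         previous = values[0]
--         values[0] = 0
--         for idx in range(1, len(values)):
--             a=values[idx]
--             values[idx] = 2 * previous
--             previous = a
--     return values
-- ===== SOURCE B (Python) =====
-- def doublePreceding(values):
--     if len(values) > 0:
--         result = [0] + [2 * v for v in values[:-1]]
--         values[:] = result
--     return values
-- ===== Notes on version B (the rewrite author's own statement) =====
-- stated objective: idiomatic
-- what changed: Replaces the stateful index loop with a 'previous' temporary by building the shifted, doubled copy [0] + [2*v for v in values[:-1]] at once and bulk-assigning it back with values[:] = result.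
import Mathlib
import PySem

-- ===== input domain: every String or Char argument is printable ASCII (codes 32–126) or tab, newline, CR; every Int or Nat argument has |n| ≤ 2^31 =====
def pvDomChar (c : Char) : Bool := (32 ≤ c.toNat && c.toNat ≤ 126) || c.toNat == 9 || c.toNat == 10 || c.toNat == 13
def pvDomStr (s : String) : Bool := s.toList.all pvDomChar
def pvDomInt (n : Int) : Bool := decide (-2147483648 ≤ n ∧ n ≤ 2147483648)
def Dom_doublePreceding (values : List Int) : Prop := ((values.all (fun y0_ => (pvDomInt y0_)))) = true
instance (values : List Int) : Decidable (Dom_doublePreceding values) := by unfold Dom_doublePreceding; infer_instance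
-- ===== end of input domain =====

-- B builds the shifted doubled list in one comprehension and bulk-assigns it, instead of A's
-- index loop with a 'previous' temporary; both Pythons mutate the argument in place and the
-- equivalence proved here is about the return value.

-- ===== PORT A =====
-- loop body: a = values[idx]; values[idx] = 2*previous; previous = a
def pvStepA (st : List Int × Int) (idx : Int) : List Int × Int :=
  let a := PySem.List.pyGetD st.1 idx 0
  (PySem.List.pySetD st.1 idx (2 * st.2), a)

def doublePreceding (values : List Int) : List Int :=
  if values.length > 0 then
    let previous := PySem.List.pyGetD values 0 0
    let values1 := PySem.List.pySetD values 0 0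
    let st := (PySem.List.pyRange 1 (values1.length : Int) 1).foldl pvStepA (values1, previous)
    st.1
  else values

-- ===== PORT B =====
def doublePreceding_alt (values : List Int) : List Int :=
  if values.length > 0 then
    0 :: (PySem.List.slice values none (some (-1))).map (fun v => 2 * v)
  else values

-- ===== PRECONDITION & SPEC =====
def Spec_doublePreceding (values : List Int) (out : List Int) : Prop := out = doublePreceding_alt values
instance (values : List Int) (out : List Int) : Decidable (Spec_doublePreceding values out) := by unfold Spec_doublePreceding; infer_instance

-- ===== CLAIM (what is proved, stated in full; the proofs are below) =====
def Claim_equal_doublePreceding : Prop := ∀ (values : List Int), Dom_doublePreceding values → Spec_doublePreceding values (doublePreceding values)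

-- ===== LEMMAS AND PROOFS =====

-- invariant of A's loop: with the first pre.length cells final and prev the pending predecessor,
-- the loop from index pre.length finishes to pre ++ map (2*·) (prev :: rest).dropLast
theorem pvLoopInv (rest : List Int) : ∀ (pre : List Int) (prev : Int),
    ((PySem.List.pyRange (pre.length : Int) ((pre.length + rest.length : Nat) : Int) 1).foldl
        pvStepA (pre ++ rest, prev)).1
      = pre ++ ((prev :: rest).dropLast).map (fun v => 2 * v) := by
  induction rest with
  | nil =>
    intro pre prev
    simp [PySem.List.pyRange_one_eq_nil]
  | cons r rs ih =>
    intro pre prev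
    have hlt : (pre.length : Int) < ((pre.length + (r :: rs).length : Nat) : Int) := by
      simp only [List.length_cons]; push_cast; omega
    rw [PySem.List.pyRange_one_cons hlt]
    simp only [List.foldl_cons]
    have hstep : pvStepA (pre ++ r :: rs, prev) (pre.length : Int)
        = (pre ++ 2 * prev :: rs, r) := by
      unfold pvStepA
      simp [PySem.List.pyGetD_natCast, PySem.List.pySetD_natCast,
        List.getD_eq_getElem?_getD]
    rw [hstep]
    have hpre : pre ++ 2 * prev :: rs = (pre ++ [2 * prev]) ++ rs := by simp
    have hlen : ((pre.length : Int) + 1) = (((pre ++ [2 * prev]).length : Nat) : Int) := by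
      simp
    have hlen2 : ((pre.length + (r :: rs).length : Nat) : Int)
        = (((pre ++ [2 * prev]).length + rs.length : Nat) : Int) := by
      simp only [List.length_cons, List.length_append, List.length_nil]
      push_cast; omega
    rw [hpre, hlen, hlen2, ih (pre ++ [2 * prev]) r]
    simp

-- ===== VERDICT (by name: the statement is the Claim_ definition above) =====
theorem doublePreceding_spec : Claim_equal_doublePreceding := by
  intro values _
  unfold Spec_doublePreceding doublePreceding doublePreceding_alt
  cases values with
  | nil => simp
  | cons v vt =>
    rw [if_pos (by simp : (v :: vt).length > 0), if_pos (by simp : (v :: vt).length > 0)]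
    have h1 : PySem.List.pyGetD (v :: vt) 0 0 = v := by
      simp [PySem.List.pyGetD_zero_cons]
    have h2 : PySem.List.pySetD (v :: vt) 0 0 = (0 : Int) :: vt := by
      simp [PySem.List.pySetD_of_nonneg]
    rw [h1, h2]
    show (List.foldl pvStepA ((0 : Int) :: vt, v)
        (PySem.List.pyRange 1 ((((0 : Int) :: vt).length : Nat) : Int) 1)).1
      = 0 :: (PySem.List.slice (v :: vt) none (some (-1))).map (fun v => 2 * v)
    simp only [List.length_cons]
    have key := pvLoopInv vt [(0 : Int)] v
    simp only [List.length_cons, List.length_nil, List.singleton_append, Nat.zero_add,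
      Nat.cast_one] at key
    rw [Nat.add_comm 1 vt.length] at key
    rw [key]
    simp [PySem.List.slice_to_neg_one]
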